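-- pv_equiv track=rewrite | github.com/cpitsch/cdrift-evaluation | evaluation.py | getTP_FP
-- ===== SOURCE A (Python) =====
-- from typing import Dict, List, Tuple
--
-- def getTP_FP(lag:int, detected:List[int], known:List[int]):
--     TP = 0
--     FP = 0
--     for point in known:
--         window_begin = point-lag
--         window_end = point+lag
--         if any([window_begin <= d and d <= window_end for d in detected]):
--             TP += 1
--     FP = len(detected) - TP
--     return (TP,FP)
-- ===== SOURCE B (Python) =====
-- def _bisect_left(ds, x):
--     lo, hi = 0, len(ds)
--     while lo < hi:
--         mid = (lo + hi) // 2
--         if ds[mid] < x: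
--             lo = mid + 1
--         else:
--             hi = mid
--     return lo
--
--
-- def getTP_FP(lag, detected, known):
--     ds = sorted(detected)
--     tp = 0
--     for point in known:
--         i = _bisect_left(ds, point - lag)
--         if i < len(ds) and ds[i] <= point + lag:
--             tp += 1
--     return (tp, len(detected) - tp)
-- ===== Notes on version B (the rewrite author's own statement) =====
-- stated objective: faster
-- what changed: Sorts detected once and binary-searches the lag window per known point instead of scanning all of detected for every known point.
import Mathlib
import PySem

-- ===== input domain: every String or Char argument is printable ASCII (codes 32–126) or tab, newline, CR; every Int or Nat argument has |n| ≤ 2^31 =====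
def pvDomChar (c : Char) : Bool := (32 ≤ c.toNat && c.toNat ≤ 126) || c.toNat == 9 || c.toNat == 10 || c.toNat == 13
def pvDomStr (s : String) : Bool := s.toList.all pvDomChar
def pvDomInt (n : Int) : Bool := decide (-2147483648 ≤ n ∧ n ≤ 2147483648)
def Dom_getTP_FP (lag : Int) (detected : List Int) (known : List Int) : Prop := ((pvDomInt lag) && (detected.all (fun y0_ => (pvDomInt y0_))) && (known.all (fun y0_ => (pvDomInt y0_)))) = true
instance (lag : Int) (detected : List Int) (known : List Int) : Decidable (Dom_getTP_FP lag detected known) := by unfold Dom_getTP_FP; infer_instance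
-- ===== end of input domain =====

-- B sorts detected once and binary-searches the lag window per known point (asymptotically faster than A's scan of detected per known point).

-- ===== PORT A =====
def getTP_FP (lag : Int) (detected : List Int) (known : List Int) : Int × Int :=
  let TP : Int :=
    known.foldl (fun TP point =>
      let window_begin := point - lag
      let window_end := point + lag
      if (detected.map (fun d => decide (window_begin ≤ d) && decide (d ≤ window_end))).any (fun b => b)
      then TP + 1 else TP) 0
  let FP : Int := (detected.length : Int) - TP
  (TP, FP)

-- ===== PORT B =====
-- Source B's _bisect_left is the textbook while-loop (lo/hi, mid=(lo+hi)//2); PySem.List.bisectLeft is that exact loop.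
def getTP_FP_alt (lag : Int) (detected : List Int) (known : List Int) : Int × Int :=
  let ds := PySem.List.sorted detected (fun x => x) false
  let tp : Int :=
    known.foldl (fun tp point =>
      let i := PySem.List.bisectLeft ds (point - lag)
      if i < ds.length ∧ ds.getD i 0 ≤ point + lag then tp + 1 else tp) 0
  (tp, (detected.length : Int) - tp)

-- ===== PRECONDITION & SPEC =====
def Spec_getTP_FP (lag : Int) (detected : List Int) (known : List Int) (out : Int × Int) : Prop := out = getTP_FP_alt lag detected known
instance (lag : Int) (detected : List Int) (known : List Int) (out : Int × Int) : Decidable (Spec_getTP_FP lag detected known out) := by unfold Spec_getTP_FP; infer_instance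

-- ===== CLAIM (what is proved, stated in full; the proofs are below) =====
def Claim_equal_getTP_FP : Prop := ∀ (lag : Int) (detected : List Int) (known : List Int), Dom_getTP_FP lag detected known → Spec_getTP_FP lag detected known (getTP_FP lag detected known)

-- ===== LEMMAS AND PROOFS =====

-- For each known point, A's linear scan and B's binary search agree.
theorem hit_iff (lag : Int) (detected : List Int) (point : Int) :
    ((detected.map (fun d => decide (point - lag ≤ d) && decide (d ≤ point + lag))).any (fun b => b)
      = true)
    ↔ (PySem.List.bisectLeft (PySem.List.sorted detected (fun x => x) false) (point - lag)
          < (PySem.List.sorted detected (fun x => x) false).length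
        ∧ (PySem.List.sorted detected (fun x => x) false).getD
            (PySem.List.bisectLeft (PySem.List.sorted detected (fun x => x) false) (point - lag)) 0
          ≤ point + lag) := by
  set ds := PySem.List.sorted detected (fun x => x) false with hds
  have hpair : ds.Pairwise (fun a b => a ≤ b) := PySem.List.sorted_pairwise detected (fun x => x)
  obtain ⟨hle, hlt, hge⟩ := PySem.List.bisectLeft_spec ds (point - lag) hpair
  set i := PySem.List.bisectLeft ds (point - lag) with hi
  constructor
  · intro h
    simp only [List.any_map, List.any_eq_true, Function.comp, Bool.and_eq_true, decide_eq_true_eq] at h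
    obtain ⟨d, hd, h1, h2⟩ := h
    have hdm : d ∈ ds := by
      rw [hds]; exact (PySem.List.mem_sorted detected (fun x => x) false d).2 hd
    obtain ⟨j, hj, hje⟩ := List.mem_iff_getElem.1 hdm
    have hij : i ≤ j := by
      by_contra hc
      exact absurd h1 (by rw [← hje]; exact not_le.2 (hlt j hj (lt_of_not_ge hc)))
    have hilen : i < ds.length := lt_of_le_of_lt hij hj
    refine ⟨hilen, ?_⟩
    have : ds[i] ≤ ds[j] := PySem.List.sorted_id_getElem_mono detected hij hj
    rw [List.getD_eq_getElem ds 0 hilen]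
    rw [hje] at this
    exact le_trans this h2
  · rintro ⟨hilen, hival⟩
    simp only [List.any_map, List.any_eq_true, Function.comp, Bool.and_eq_true, decide_eq_true_eq]
    refine ⟨ds[i], ?_, hge i hilen le_rfl, ?_⟩
    · exact (PySem.List.mem_sorted detected (fun x => x) false _).1 (ds.getElem_mem hilen)
    · rw [List.getD_eq_getElem ds 0 hilen] at hival; exact hival

theorem fold_eq (lag : Int) (detected : List Int) (known : List Int) (acc : Int) :
    known.foldl (fun TP point =>
      let window_begin := point - lag
      let window_end := point + lag
      if (detected.map (fun d => decide (window_begin ≤ d) && decide (d ≤ window_end))).any (fun b => b)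
      then TP + 1 else TP) acc
    = known.foldl (fun tp point =>
      let i := PySem.List.bisectLeft (PySem.List.sorted detected (fun x => x) false) (point - lag)
      if i < (PySem.List.sorted detected (fun x => x) false).length
          ∧ (PySem.List.sorted detected (fun x => x) false).getD i 0 ≤ point + lag
      then tp + 1 else tp) acc := by
  induction known generalizing acc with
  | nil => rfl
  | cons p t ih =>
    simp only [List.foldl_cons]
    rw [show (if (detected.map (fun d => decide (p - lag ≤ d) && decide (d ≤ p + lag))).any (fun b => b) then acc + 1 else acc)
        = (if PySem.List.bisectLeft (PySem.List.sorted detected (fun x => x) false) (p - lag)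
              < (PySem.List.sorted detected (fun x => x) false).length
            ∧ (PySem.List.sorted detected (fun x => x) false).getD
                (PySem.List.bisectLeft (PySem.List.sorted detected (fun x => x) false) (p - lag)) 0
              ≤ p + lag
          then acc + 1 else acc) from by
      by_cases h : (detected.map (fun d => decide (p - lag ≤ d) && decide (d ≤ p + lag))).any (fun b => b) = true
      · rw [if_pos h, if_pos ((hit_iff lag detected p).1 h)]
      · rw [if_neg h, if_neg (fun hc => h ((hit_iff lag detected p).2 hc))]]
    exact ih _

-- ===== VERDICT (by name: the statement is the Claim_ definition above) =====
theorem getTP_FP_spec : Claim_equal_getTP_FP := by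
  intro lag detected known _
  unfold Spec_getTP_FP getTP_FP getTP_FP_alt
  simp only []
  rw [fold_eq]
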